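-- pv_equiv track=rewrite | github.com/kiadwa/SolvedProblems | Books.py | solution
-- ===== SOURCE A (Python) =====
-- def solution(n,t,a):
--     cnt = 0
--     max_book = 0
--     s = 0
--     for i in range(n):
--         ep = a[i] #end pointer
--         cnt += ep
--         while cnt > t:
--             sp = a[s] #start pointer
--             cnt -= sp
--             s += 1
--         max_book = max(max_book,i - s + 1)
--     return max_book
-- ===== SOURCE B (Python) =====
-- def solution(n, t, a):
--     # prefix sums: P[k] = a[0] + ... + a[k-1]
--     P = [0]
--     for k in range(n):
--         P.append(P[-1] + a[k])
--     max_book = 0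
--     for i in range(n):
--         # leftmost s with P[s] >= P[i+1] - t, by binary search on the monotone prefix array
--         target = P[i + 1] - t
--         lo, hi = 0, i + 1
--         while lo < hi:
--             mid = (lo + hi) // 2
--             if P[mid] >= target:
--                 hi = mid
--             else:
--                 lo = mid + 1
--         max_book = max(max_book, i - lo + 1)
--     return max_book
-- ===== Notes on version B (the rewrite author's own statement) =====
-- stated objective: alternative
-- what changed: Replaced A's amortised two-pointer sliding window by a precomputed prefix-sum table with a binary search for the leftmost feasible start at each right endpoint.
-- outside the precondition, e.g. on solution(2, 4, [5, -5]): A returns 1, B returns 2; on solution(1, -1, [2, 3]): A returns 0, B returns 0; on solution(3, 5, [1, 1]): A raises IndexError, B raises IndexError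
import Mathlib
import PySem

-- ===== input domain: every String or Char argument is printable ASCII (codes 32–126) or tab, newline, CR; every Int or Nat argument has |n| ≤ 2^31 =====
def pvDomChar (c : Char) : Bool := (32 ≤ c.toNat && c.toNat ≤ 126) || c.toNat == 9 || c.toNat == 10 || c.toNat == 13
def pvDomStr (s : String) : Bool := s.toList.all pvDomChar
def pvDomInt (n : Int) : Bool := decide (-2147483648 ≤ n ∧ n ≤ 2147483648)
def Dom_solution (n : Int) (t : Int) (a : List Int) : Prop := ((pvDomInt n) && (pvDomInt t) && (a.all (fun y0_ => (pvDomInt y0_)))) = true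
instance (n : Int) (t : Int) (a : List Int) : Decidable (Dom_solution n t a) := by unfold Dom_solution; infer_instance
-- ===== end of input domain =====

-- B replaces A's amortised two-pointer sliding window by prefix sums with a binary search per
-- right endpoint (alternative decomposition, same task); equivalence proved on the natural domain.

-- ===== PORT A =====
-- the inner 'while cnt > t' loop; the fuel argument only makes the recursion total
-- (on Pre_ the loop needs at most a.length steps, so fuel a.length + 1 is never exhausted)
def pvShrinkA (t : Int) (a : List Int) : Nat → Int → Int → Int × Int
  | 0, cnt, s => (cnt, s)
  | fuel + 1, cnt, s =>
    if t < cnt then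
      pvShrinkA t a fuel (cnt - PySem.List.pyGetD a s 0) (s + 1)
    else (cnt, s)

def solution (n : Int) (t : Int) (a : List Int) : Int :=
  ((PySem.List.pyRange 0 n 1).foldl
    (fun st i =>
      let cnt := st.1 + PySem.List.pyGetD a i 0
      let r := pvShrinkA t a (a.length + 1) cnt st.2.2
      (r.1, max st.2.1 (i - r.2 + 1), r.2))
    (0, 0, 0)).2.1

-- ===== PORT B =====
-- the inner 'while lo < hi' binary search of Source B; fuel only makes the recursion total
def pvBsearch (P : List Int) (target : Int) : Nat → Int → Int → Int
  | 0, lo, _ => lo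
  | fuel + 1, lo, hi =>
    if lo < hi then
      let mid := PySem.Int.floordiv (lo + hi) 2
      if PySem.List.pyGetD P mid 0 ≥ target then pvBsearch P target fuel lo mid
      else pvBsearch P target fuel (mid + 1) hi
    else lo

def solution_alt (n : Int) (t : Int) (a : List Int) : Int :=
  let P := (PySem.List.pyRange 0 n 1).foldl
    (fun P k => P ++ [PySem.List.pyGetD P (-1) 0 + PySem.List.pyGetD a k 0]) [0]
  (PySem.List.pyRange 0 n 1).foldl
    (fun best i =>
      let target := PySem.List.pyGetD P (i + 1) 0 - t
      let lo := pvBsearch P target (a.length + 1) 0 (i + 1)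
      max best (i - lo + 1)) 0

-- ===== PRECONDITION & SPEC =====
-- Pre_ excludes inputs where A raises IndexError (n beyond len(a), or with t < 0 the shrinking
-- pointer running off the list), and negative reading times among the first n books / negative t,
-- which lie outside the natural domain of the task and on which A's one-way window pointer
-- returns accidental values.
def Pre_solution (n : Int) (t : Int) (a : List Int) : Prop :=
  n ≤ 0 ∨ (n ≤ (a.length : Int) ∧ 0 ≤ t ∧ (a.take n.toNat).all (fun x => decide (0 ≤ x)) = true)
instance (n : Int) (t : Int) (a : List Int) : Decidable (Pre_solution n t a) := by
  unfold Pre_solution; infer_instance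

def pvWitness_solution : Int × Int × List Int := (3, 4, [1, 2, 3])

def Spec_solution (n : Int) (t : Int) (a : List Int) (out : Int) : Prop := out = solution_alt n t a
instance (n : Int) (t : Int) (a : List Int) (out : Int) : Decidable (Spec_solution n t a out) := by unfold Spec_solution; infer_instance

-- ===== CLAIM (what is proved, stated in full; the proofs are below) =====
def Claim_equal_solution : Prop := ∀ (n : Int) (t : Int) (a : List Int), Dom_solution n t a → Pre_solution n t a → Spec_solution n t a (solution n t a)

-- ===== LEMMAS AND PROOFS =====

-- prefix sum: pvPsum a k = a[0] + ... + a[k-1]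
def pvPsum (a : List Int) (k : Nat) : Int := (a.take k).sum

-- the window predicate: the window [s, i] fits within t
def pvOK (t : Int) (a : List Int) (i s : Nat) : Bool :=
  decide (pvPsum a (i + 1) - pvPsum a s ≤ t)

-- leftmost feasible window start for right endpoint i
def pvL (t : Int) (a : List Int) (i : Nat) : Nat :=
  (((List.range (i + 2)).find? (pvOK t a i)).getD (i + 1))

-- A's loop state after m iterations: window start pvS and running maximum pvM
def pvS (t : Int) (a : List Int) : Nat → Nat
  | 0 => 0
  | m + 1 => pvL t a m

def pvM (t : Int) (a : List Int) : Nat → Int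
  | 0 => 0
  | m + 1 => max (pvM t a m) ((m : Int) - (pvL t a m : Int) + 1)

theorem pvPsum_succ (a : List Int) (m : Nat) (h : m < a.length) :
    pvPsum a (m + 1) = pvPsum a m + a.getD m 0 := by
  rw [pvPsum, pvPsum, List.sum_take_succ a m h, List.getD_eq_getElem a 0 h]

theorem pvPsum_mono (a : List Int) (N : Nat) (hNN : ∀ i < N, 0 ≤ a.getD i 0)
    {s s' : Nat} (h : s ≤ s') (hs' : s' ≤ N) :
    pvPsum a s ≤ pvPsum a s' := by
  rw [pvPsum, pvPsum, ← Nat.add_sub_cancel' h, List.take_add, List.sum_append]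
  have : 0 ≤ ((a.drop s).take (s' - s)).sum := by
    apply List.sum_nonneg
    intro x hx
    obtain ⟨j, hj, rfl⟩ := List.mem_iff_getElem.mp hx
    have hjlen : s + j < a.length := by
      simp [List.length_take, List.length_drop] at hj
      omega
    have hjN : s + j < N := by
      simp [List.length_take, List.length_drop] at hj
      omega
    have := hNN (s + j) hjN
    rw [List.getD_eq_getElem a 0 hjlen] at this
    simpa using this
  omega

theorem pvL_spec (t : Int) (a : List Int) (ht : 0 ≤ t) (i : Nat) :
    pvOK t a i (pvL t a i) = true ∧ pvL t a i ≤ i + 1 ∧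
      ∀ j < pvL t a i, pvOK t a i j = false := by
  have hp : pvOK t a i (i + 1) = true := by simp [pvOK]; omega
  rcases hfind : (List.range (i + 2)).find? (pvOK t a i) with _ | x
  · exfalso
    have := List.find?_eq_none.mp hfind (i + 1) (List.mem_range.mpr (by omega))
    simp [hp] at this
  · rw [List.range_eq_range'] at hfind
    obtain ⟨h1, h2, h3⟩ := List.find?_range'_eq_some.mp hfind
    have hx : x ≤ i + 1 := by
      have := List.mem_range'_1.mp h2; omega
    refine ⟨?_, ?_, ?_⟩
    · simpa [pvL, List.range_eq_range', hfind] using h1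
    · simpa [pvL, List.range_eq_range', hfind] using hx
    · intro j hj
      simp only [pvL, List.range_eq_range', hfind, Option.getD_some] at hj
      have := h3 j (Nat.zero_le j) hj
      simpa using this

theorem pvL_mono (t : Int) (a : List Int) (ht : 0 ≤ t) (N : Nat)
    (hNN : ∀ i < N, 0 ≤ a.getD i 0) (i : Nat) (hiN : i + 2 ≤ N) :
    pvL t a i ≤ pvL t a (i + 1) := by
  by_contra hcon
  push Not at hcon
  obtain ⟨h1', _, _⟩ := pvL_spec t a ht (i + 1)
  obtain ⟨_, _, h3⟩ := pvL_spec t a ht i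
  have hfalse := h3 _ hcon
  have hmono : pvPsum a (i + 1) ≤ pvPsum a (i + 2) := pvPsum_mono a N hNN (by omega) (by omega)
  simp [pvOK] at h1' hfalse
  simp only [show i + 1 + 1 = i + 2 by omega] at h1'
  omega

theorem pvShrinkA_correct (t : Int) (a : List Int) (ht : 0 ≤ t) (i : Nat)
    (hi : i + 1 ≤ a.length) :
    ∀ (fuel : Nat) (s0 : Nat), s0 ≤ pvL t a i → pvL t a i - s0 ≤ fuel →
    pvShrinkA t a fuel (pvPsum a (i + 1) - pvPsum a s0) (s0 : Int)
      = (pvPsum a (i + 1) - pvPsum a (pvL t a i), ((pvL t a i : Nat) : Int)) := by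
  obtain ⟨hok, hle, hmin⟩ := pvL_spec t a ht i
  intro fuel
  induction fuel with
  | zero =>
    intro s0 hs0 hf
    have : s0 = pvL t a i := by omega
    subst this
    simp [pvShrinkA]
  | succ fuel ih =>
    intro s0 hs0 hf
    by_cases hstop : pvPsum a (i + 1) - pvPsum a s0 ≤ t
    · have : s0 = pvL t a i := by
        rcases Nat.lt_or_ge s0 (pvL t a i) with hlt | hge
        · have := hmin s0 hlt; simp [pvOK] at this; omega
        · omega
      subst this
      simp [pvShrinkA]
      omega
    · push Not at hstop
      have hlt : s0 < pvL t a i := by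
        rcases Nat.lt_or_ge s0 (pvL t a i) with hlt | hge
        · exact hlt
        · have : s0 = pvL t a i := by omega
          subst this
          simp [pvOK] at hok
          omega
      have hs0len : s0 < a.length := by omega
      rw [pvShrinkA]
      rw [if_pos hstop]
      have hget : PySem.List.pyGetD a (s0 : Int) 0 = a.getD s0 0 := by
        simp [PySem.List.pyGetD_natCast]
      rw [hget]
      have hstep : pvPsum a (i + 1) - pvPsum a s0 - a.getD s0 0
          = pvPsum a (i + 1) - pvPsum a (s0 + 1) := by
        rw [pvPsum_succ a s0 hs0len]; ring
      rw [hstep]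
      have hcast : (s0 : Int) + 1 = ((s0 + 1 : Nat) : Int) := by push_cast; ring
      rw [hcast]
      exact ih (s0 + 1) (by omega) (by omega)

theorem pvBsearch_correct (t : Int) (a : List Int) (P : List Int) (ht : 0 ≤ t) (i : Nat)
    (N : Nat) (hNN : ∀ i < N, 0 ≤ a.getD i 0) (hiN : i + 1 ≤ N)
    (hPk : ∀ k, k ≤ i + 1 → PySem.List.pyGetD P (k : Int) 0 = pvPsum a k) :
    ∀ (fuel : Nat) (lo hi : Nat), lo ≤ pvL t a i → pvL t a i ≤ hi → hi ≤ i + 1 →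
      hi - lo ≤ fuel →
    pvBsearch P (pvPsum a (i + 1) - t) fuel (lo : Int) (hi : Int)
      = ((pvL t a i : Nat) : Int) := by
  obtain ⟨hok, hle, hmin⟩ := pvL_spec t a ht i
  intro fuel
  induction fuel with
  | zero =>
    intro lo hi h1 h2 h3 h4
    have hlo : lo = pvL t a i := by omega
    subst hlo
    simp [pvBsearch]
  | succ fuel ih =>
    intro lo hi h1 h2 h3 h4
    by_cases hlh : lo < hi
    · rw [pvBsearch]
      rw [if_pos (by exact_mod_cast hlh)]
      have hsum : (lo : Int) + (hi : Int) = ((lo + hi : Nat) : Int) := by push_cast; ring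
      have hfd : PySem.Int.floordiv ((lo + hi : Nat) : Int) 2 = (((lo + hi) / 2 : Nat) : Int) := by
        exact_mod_cast PySem.Int.floordiv_natCast (lo + hi) 2
      simp only [hsum, hfd]
      set m : Nat := (lo + hi) / 2 with hm
      have hmlo : lo ≤ m := by omega
      have hmhi : m < hi := by omega
      rw [hPk m (by omega)]
      by_cases hc : pvPsum a (i + 1) - t ≤ pvPsum a m
      · rw [if_pos (by omega)]
        have : pvL t a i ≤ m := by
          by_contra hcon
          push Not at hcon
          have := hmin m hcon
          simp [pvOK] at this
          omega
        exact ih lo m h1 this (by omega) (by omega)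
      · rw [if_neg (by omega)]
        have hml : m < pvL t a i := by
          rcases Nat.lt_or_ge m (pvL t a i) with h | h
          · exact h
          · have hmono := pvPsum_mono a N hNN h (by omega)
            simp [pvOK] at hok
            omega
        have hcast : ((m : Nat) : Int) + 1 = ((m + 1 : Nat) : Int) := by push_cast; ring
        rw [hcast]
        exact ih (m + 1) hi (by omega) h2 h3 (by omega)
    · have hlo : lo = pvL t a i := by omega
      subst hlo
      rw [pvBsearch]
      rw [if_neg (by exact_mod_cast hlh)]

theorem pvS_le_pvL (t : Int) (a : List Int) (ht : 0 ≤ t) (N : Nat)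
    (hNN : ∀ i < N, 0 ≤ a.getD i 0) (m : Nat) (hm : m + 1 ≤ N) :
    pvS t a m ≤ pvL t a m := by
  cases m with
  | zero => exact Nat.zero_le _
  | succ k => exact pvL_mono t a ht N hNN k (by omega)

-- A's fold over range N computes (window sum, running max, window start)
theorem pvA_fold (t : Int) (a : List Int) (ht : 0 ≤ t) :
    ∀ (N : Nat), N ≤ a.length → (∀ i < N, 0 ≤ a.getD i 0) →
    ((List.range N).foldl
      (fun (st : Int × Int × Int) (k : Nat) =>
        let cnt := st.1 + PySem.List.pyGetD a (k : Int) 0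
        let r := pvShrinkA t a (a.length + 1) cnt st.2.2
        (r.1, max st.2.1 ((k : Int) - r.2 + 1), r.2))
      (0, 0, 0))
      = (pvPsum a N - pvPsum a (pvS t a N), pvM t a N, ((pvS t a N : Nat) : Int)) := by
  intro N
  induction N with
  | zero => intro _ _; simp [pvS, pvM, pvPsum]
  | succ m ih =>
    intro hlen hNN
    rw [List.range_succ, List.foldl_append, ih (by omega) (fun i hi => hNN i (by omega))]
    simp only [List.foldl_cons, List.foldl_nil]
    obtain ⟨hok, hle, hmin⟩ := pvL_spec t a ht m
    have hget : PySem.List.pyGetD a (m : Int) 0 = a.getD m 0 := by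
      simp [PySem.List.pyGetD_natCast]
    have hcnt : pvPsum a m - pvPsum a (pvS t a m) + a.getD m 0
        = pvPsum a (m + 1) - pvPsum a (pvS t a m) := by
      rw [pvPsum_succ a m (by omega)]; ring
    have hshr := pvShrinkA_correct t a ht m (by omega) (a.length + 1) (pvS t a m)
      (pvS_le_pvL t a ht (m + 1) hNN m (le_refl _)) (by omega)
    simp only [hget, hcnt, hshr]
    simp [pvS, pvM]

-- B's first fold builds exactly the table of prefix sums
theorem pvP_fold (a : List Int) :
    ∀ (N : Nat), N ≤ a.length →
    ((List.range N).foldl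
      (fun (P : List Int) (k : Nat) =>
        P ++ [PySem.List.pyGetD P (-1) 0 + PySem.List.pyGetD a (k : Int) 0]) [0])
      = (List.range (N + 1)).map (pvPsum a) := by
  intro N
  induction N with
  | zero => simp [pvPsum]
  | succ m ih =>
    intro hlen
    rw [List.range_succ, List.foldl_append, ih (by omega)]
    simp only [List.foldl_cons, List.foldl_nil]
    have hne : (List.range (m + 1)).map (pvPsum a) ≠ [] := by simp
    rw [PySem.List.pyGetD_neg_one _ _ hne]
    have hlast : ((List.range (m + 1)).map (pvPsum a)).getLast hne = pvPsum a m := by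
      rw [List.getLast_eq_getElem]
      simp
    rw [hlast]
    have hget : PySem.List.pyGetD a (m : Int) 0 = a.getD m 0 := by
      simp [PySem.List.pyGetD_natCast]
    rw [hget]
    conv_rhs => rw [List.range_succ, List.map_append, List.range_succ, List.map_append]
    simp [pvPsum_succ a m (by omega), List.getD]
    rw [List.range_succ, List.map_append]
    simp

-- B's second fold computes the same running maximum as A
theorem pvB_fold (t : Int) (a : List Int) (ht : 0 ≤ t)
    (N : Nat) (hlen : N ≤ a.length) (hNN : ∀ i < N, 0 ≤ a.getD i 0) :
    ∀ (M : Nat), M ≤ N →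
    ((List.range M).foldl
      (fun (best : Int) (k : Nat) =>
        let target := PySem.List.pyGetD ((List.range (N + 1)).map (pvPsum a)) ((k : Int) + 1) 0 - t
        let lo := pvBsearch ((List.range (N + 1)).map (pvPsum a)) target (a.length + 1) 0 ((k : Int) + 1)
        max best ((k : Int) - lo + 1)) 0)
      = pvM t a M := by
  have hPk : ∀ k : Nat, k ≤ N → PySem.List.pyGetD ((List.range (N + 1)).map (pvPsum a)) (k : Int) 0 = pvPsum a k := by
    intro k hk
    rw [PySem.List.pyGetD_natCast]
    rw [List.getD_eq_getElem _ 0 (by simp; omega)]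
    simp
  set P := (List.range (N + 1)).map (pvPsum a) with hPdef
  intro M
  induction M with
  | zero => simp [pvM]
  | succ m ih =>
    intro hM
    rw [List.range_succ, List.foldl_append, ih (by omega)]
    simp only [List.foldl_cons, List.foldl_nil]
    obtain ⟨hok, hle, hmin⟩ := pvL_spec t a ht m
    have hc1 : ((m : Nat) : Int) + 1 = ((m + 1 : Nat) : Int) := by push_cast; ring
    rw [hc1, hPk (m + 1) (by omega)]
    have hbs := pvBsearch_correct t a P ht m N hNN (by omega)
      (fun k hk => hPk k (by omega)) (a.length + 1) 0 (m + 1)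
      (Nat.zero_le _) hle (le_refl _) (by omega)
    rw [show ((0 : Nat) : Int) = (0 : Int) from rfl] at hbs
    rw [hbs]
    simp [pvM]

theorem pv_main (n t : Int) (a : List Int)
    (hnl : n ≤ (a.length : Int)) (ht : 0 ≤ t) (hNN : ∀ i < n.toNat, 0 ≤ a.getD i 0) :
    solution n t a = solution_alt n t a := by
  set N := n.toNat with hN
  have hNlen : N ≤ a.length := by omega
  have hrange : PySem.List.pyRange 0 n 1 = (List.range N).map (fun k : Nat => (k : Int)) := by
    rw [PySem.List.pyRange_one]
    simp only [Int.sub_zero, zero_add, hN]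
  unfold solution solution_alt
  rw [hrange]
  simp only [List.foldl_map]
  simp only [pvA_fold t a ht N hNlen hNN, pvP_fold a N hNlen,
    pvB_fold t a ht N hNlen hNN N (le_refl N)]

theorem pv_pre_nn (a : List Int) (N : Nat)
    (h : (a.take N).all (fun x => decide (0 ≤ x)) = true) :
    ∀ i < N, 0 ≤ a.getD i 0 := by
  intro i hi
  by_cases hlen : i < a.length
  · have hit : i < (a.take N).length := by simp; omega
    have hmem : (a.take N)[i] ∈ a.take N := List.getElem_mem hit
    have hval := List.all_eq_true.mp h _ hmem
    rw [List.getElem_take] at hval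
    rw [List.getD_eq_getElem a 0 hlen]
    simpa using hval
  · rw [List.getD_eq_default a 0 (by omega)]

theorem pv_main0 (n t : Int) (a : List Int) (hn : n ≤ 0) :
    solution n t a = solution_alt n t a := by
  unfold solution solution_alt
  rw [PySem.List.pyRange_one_eq_nil hn]
  simp

-- ===== VERDICT (by name: the statement is the Claim_ definition above) =====
theorem solution_spec : Claim_equal_solution := by
  intro n t a _ hpre
  unfold Spec_solution
  rcases hpre with hn | ⟨hnl, ht, hNN⟩
  · exact pv_main0 n t a hn
  · exact pv_main n t a hnl ht (pv_pre_nn a n.toNat hNN)
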